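-- pv_equiv track=rewrite | github.com/MarkkBarrett/MarkBarrett-FinalYearProject | DatasetScripts/auto_label.py | detect_pushup_reps
-- ===== SOURCE A (Python) =====
-- def detect_pushup_reps(elbow_angle_series, down_thresh=135, up_thresh=150):
--     reps = []
--     in_rep = False
--     start_frame = 0
--
--     for i, angle in enumerate(elbow_angle_series):
--         if angle is None:
--             continue
--
--         # Detect beginning of a rep (elbow bending down)
--         if angle < down_thresh and not in_rep:
--             in_rep = True
--             start_frame = i
--
--         # Detect end of a rep (elbow straightened up)
--         if angle > up_thresh and in_rep:
--             in_rep = False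
--             reps.append({"start_frame": start_frame, "end_frame": i})
--
--     return reps
-- ===== SOURCE B (Python) =====
-- def detect_pushup_reps(elbow_angle_series, down_thresh=135, up_thresh=150):
--     # Two index lists + a two-pointer merge instead of a frame-by-frame state machine.
--     downs = [i for i, a in enumerate(elbow_angle_series) if a is not None and a < down_thresh]
--     ups = [i for i, a in enumerate(elbow_angle_series) if a is not None and a > up_thresh]
--     reps = []
--     di = ui = 0
--     while di < len(downs):
--         start = downs[di]
--         while ui < len(ups) and ups[ui] < start:
--             ui += 1
--         if ui == len(ups):
--             break
--         end = ups[ui]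
--         ui += 1
--         reps.append({"start_frame": start, "end_frame": end})
--         while di < len(downs) and downs[di] <= end:
--             di += 1
--     return reps
-- ===== Notes on version B (the rewrite author's own statement) =====
-- stated objective: alternative
-- what changed: Replaced the frame-by-frame boolean state machine with two filtered index lists (down-frames, up-frames) paired by a two-pointer merge.
import Mathlib
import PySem

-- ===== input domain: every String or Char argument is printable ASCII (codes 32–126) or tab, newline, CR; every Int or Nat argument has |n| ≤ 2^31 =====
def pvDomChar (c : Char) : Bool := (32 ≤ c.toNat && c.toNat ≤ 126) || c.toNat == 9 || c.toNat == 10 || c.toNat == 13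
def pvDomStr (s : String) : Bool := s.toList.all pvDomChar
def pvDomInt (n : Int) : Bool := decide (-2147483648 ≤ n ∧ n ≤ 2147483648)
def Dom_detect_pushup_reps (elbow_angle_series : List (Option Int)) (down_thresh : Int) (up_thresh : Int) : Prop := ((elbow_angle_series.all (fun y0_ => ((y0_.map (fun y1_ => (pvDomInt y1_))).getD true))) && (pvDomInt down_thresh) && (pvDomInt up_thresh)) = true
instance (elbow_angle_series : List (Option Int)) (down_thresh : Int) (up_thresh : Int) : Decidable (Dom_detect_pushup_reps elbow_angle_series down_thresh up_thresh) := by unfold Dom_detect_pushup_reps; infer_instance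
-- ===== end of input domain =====

-- B replaces A's frame-by-frame boolean state machine by two filtered index lists paired
-- with a two-pointer merge (objective: alternative decomposition, same asymptotic cost).

-- ===== PORT A =====
-- loop body of A's for-loop (the two sequential if-statements on the state (reps, in_rep, start_frame))
def stepA (down_thresh up_thresh : Int)
    (st : List (List (String × Int)) × Bool × Int) (p : Int × Option Int) :
    List (List (String × Int)) × Bool × Int :=
  match p.2 with
  | none => st
  | some angle =>
    let st1 := if angle < down_thresh ∧ st.2.1 = false then (st.1, true, p.1) else st
    if angle > up_thresh ∧ st1.2.1 = true then
      (st1.1 ++ [[("start_frame", st1.2.2), ("end_frame", p.1)]], false, st1.2.2)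
    else st1

def detect_pushup_reps (elbow_angle_series : List (Option Int)) (down_thresh : Int) (up_thresh : Int) : List (List (String × Int)) :=
  ((PySem.List.enumerate elbow_angle_series 0).foldl (stepA down_thresh up_thresh) ([], false, 0)).1

-- ===== PORT B =====
-- downs = [i for i, a in enumerate(series) if a is not None and a < down_thresh]
def pvDowns (elbow_angle_series : List (Option Int)) (down_thresh : Int) : List Int :=
  ((PySem.List.enumerate elbow_angle_series 0).filter
    (fun p => match p.2 with | some a => decide (a < down_thresh) | none => false)).map (fun p => p.1)

-- ups = [i for i, a in enumerate(series) if a is not None and a > up_thresh]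
def pvUps (elbow_angle_series : List (Option Int)) (up_thresh : Int) : List Int :=
  ((PySem.List.enumerate elbow_angle_series 0).filter
    (fun p => match p.2 with | some a => decide (a > up_thresh) | none => false)).map (fun p => p.1)

-- the two-pointer merge: the inner whiles advancing ui/di are the dropWhile calls
def pvPair : List Int → List Int → List (List (String × Int))
  | [], _ => []
  | s :: ds, ups =>
    match ups.dropWhile (fun i => decide (i < s)) with
    | [] => []
    | e :: us =>
      [("start_frame", s), ("end_frame", e)] :: pvPair (ds.dropWhile (fun i => decide (i ≤ e))) us
termination_by ds _ => ds.length
decreasing_by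
  simp only [List.length_cons]
  have := List.length_dropWhile_le (fun i => decide (i ≤ e)) ds
  omega

def detect_pushup_reps_alt (elbow_angle_series : List (Option Int)) (down_thresh : Int) (up_thresh : Int) : List (List (String × Int)) :=
  pvPair (pvDowns elbow_angle_series down_thresh) (pvUps elbow_angle_series up_thresh)

-- ===== PRECONDITION & SPEC =====
def Spec_detect_pushup_reps (elbow_angle_series : List (Option Int)) (down_thresh : Int) (up_thresh : Int) (out : List (List (String × Int))) : Prop := out = detect_pushup_reps_alt elbow_angle_series down_thresh up_thresh
instance (elbow_angle_series : List (Option Int)) (down_thresh : Int) (up_thresh : Int) (out : List (List (String × Int))) : Decidable (Spec_detect_pushup_reps elbow_angle_series down_thresh up_thresh out) := by unfold Spec_detect_pushup_reps; infer_instance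

-- ===== CLAIM (what is proved, stated in full; the proofs are below) =====
def Claim_equal_detect_pushup_reps : Prop := ∀ (elbow_angle_series : List (Option Int)) (down_thresh : Int) (up_thresh : Int), Dom_detect_pushup_reps elbow_angle_series down_thresh up_thresh → Spec_detect_pushup_reps elbow_angle_series down_thresh up_thresh (detect_pushup_reps elbow_angle_series down_thresh up_thresh)

-- ===== LEMMAS AND PROOFS =====

-- recursive model of A's loop (reps collected in order, no accumulator)
def runA (d u : Int) : List (Option Int) → Int → Bool → Int → List (List (String × Int))
  | [], _, _, _ => []
  | none :: t, k, b, s => runA d u t (k + 1) b s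
  | some a :: t, k, b, s =>
    let st1 := if a < d ∧ b = false then (true, k) else (b, s)
    if a > u ∧ st1.1 = true then
      [("start_frame", st1.2), ("end_frame", k)] :: runA d u t (k + 1) false st1.2
    else runA d u t (k + 1) st1.1 st1.2

-- recursive model of the index lists, with explicit start offset
def dnIdx (d : Int) : List (Option Int) → Int → List Int
  | [], _ => []
  | none :: t, k => dnIdx d t (k + 1)
  | some a :: t, k => if a < d then k :: dnIdx d t (k + 1) else dnIdx d t (k + 1)

def upIdx (u : Int) : List (Option Int) → Int → List Int
  | [], _ => []
  | none :: t, k => upIdx u t (k + 1)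
  | some a :: t, k => if a > u then k :: upIdx u t (k + 1) else upIdx u t (k + 1)

-- the merge once a rep is open at start s: close at the next up, then continue
def pvOpen (s : Int) (ds us : List Int) : List (List (String × Int)) :=
  match us with
  | [] => []
  | e :: us' =>
    [("start_frame", s), ("end_frame", e)] :: pvPair (ds.dropWhile (fun i => decide (i ≤ e))) us'

theorem dnIdx_ge (d : Int) : ∀ (t : List (Option Int)) (k i : Int), i ∈ dnIdx d t k → k ≤ i := by
  intro t
  induction t with
  | nil => intro k i h; simp [dnIdx] at h
  | cons x r ih =>
    intro k i h
    cases x with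
    | none => have := ih (k + 1) i h; omega
    | some a =>
      simp only [dnIdx] at h
      by_cases ha : a < d
      · simp [ha] at h
        rcases h with h | h
        · omega
        · have := ih (k + 1) i h; omega
      · simp [ha] at h
        have := ih (k + 1) i h; omega

theorem upIdx_ge (u : Int) : ∀ (t : List (Option Int)) (k i : Int), i ∈ upIdx u t k → k ≤ i := by
  intro t
  induction t with
  | nil => intro k i h; simp [upIdx] at h
  | cons x r ih =>
    intro k i h
    cases x with
    | none => have := ih (k + 1) i h; omega
    | some a =>
      simp only [upIdx] at h
      by_cases ha : a > u
      · simp [ha] at h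
        rcases h with h | h
        · omega
        · have := ih (k + 1) i h; omega
      · simp [ha] at h
        have := ih (k + 1) i h; omega

theorem dropWhile_le_id {l : List Int} {c : Int} (h : ∀ i ∈ l, c < i) :
    l.dropWhile (fun i => decide (i ≤ c)) = l := by
  cases l with
  | nil => rfl
  | cons x xs =>
    have hx : ¬ x ≤ c := by have := h x (by simp); omega
    simp [hx]

theorem dropWhile_lt_id {l : List Int} {c : Int} (h : ∀ i ∈ l, c ≤ i) :
    l.dropWhile (fun i => decide (i < c)) = l := by
  cases l with
  | nil => rfl
  | cons x xs =>
    have hx : ¬ x < c := by have := h x (by simp); omega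
    simp [hx]

-- pvPair ignores an up index smaller than every down index
theorem pvPair_skip_up {ds : List Int} {k : Int} (us : List Int) (h : ∀ i ∈ ds, k < i) :
    pvPair ds (k :: us) = pvPair ds us := by
  cases ds with
  | nil => simp [pvPair]
  | cons s rest =>
    have hs : k < s := h s (by simp)
    have hdw : List.dropWhile (fun i => decide (i < s)) (k :: us)
        = List.dropWhile (fun i => decide (i < s)) us := by
      simp [hs]
    rw [pvPair, pvPair, hdw]

-- a cons'd down index below every up index is consumed by the open rep
theorem pvOpen_skip_down {us : List Int} {k : Int} (s : Int) (ds : List Int)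
    (h : ∀ i ∈ us, k < i) : pvOpen s (k :: ds) us = pvOpen s ds us := by
  cases us with
  | nil => rfl
  | cons e us' =>
    have he : k ≤ e := le_of_lt (h e (by simp))
    simp [pvOpen, he]

-- opening the merge: pvPair on a cons'd start whose ups are all ≥ s
theorem pvPair_cons_eq_pvOpen {s : Int} {ds us : List Int} (h : ∀ i ∈ us, s ≤ i) :
    pvPair (s :: ds) us = pvOpen s ds us := by
  rw [pvPair, dropWhile_lt_id h]
  cases us <;> simp [pvOpen]

-- the central correspondence, both loop states at once
theorem runA_eq (d u : Int) : ∀ (t : List (Option Int)) (k : Int),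
    (∀ s, runA d u t k false s = pvPair (dnIdx d t k) (upIdx u t k)) ∧
    (∀ s, runA d u t k true s = pvOpen s (dnIdx d t k) (upIdx u t k)) := by
  intro t
  induction t with
  | nil => intro k; constructor <;> intro s <;> simp [runA, dnIdx, upIdx, pvPair, pvOpen]
  | cons x r ih =>
    intro k
    have ihF := (ih (k + 1)).1
    have ihT := (ih (k + 1)).2
    have hdn : ∀ i ∈ dnIdx d r (k + 1), k < i := fun i hi => by
      have := dnIdx_ge d r (k + 1) i hi; omega
    have hup : ∀ i ∈ upIdx u r (k + 1), k < i := fun i hi => by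
      have := upIdx_ge u r (k + 1) i hi; omega
    have hup' : ∀ i ∈ upIdx u r (k + 1), k ≤ i := fun i hi => le_of_lt (hup i hi)
    cases x with
    | none =>
      exact ⟨fun s => by simpa [runA, dnIdx, upIdx] using ihF s,
             fun s => by simpa [runA, dnIdx, upIdx] using ihT s⟩
    | some a =>
      constructor
      · intro s
        by_cases hd : a < d
        · rw [show dnIdx d (some a :: r) k = k :: dnIdx d r (k + 1) by simp [dnIdx, hd]]
          by_cases hu : a > u
          · -- rep starts and ends at the same frame k
            rw [show upIdx u (some a :: r) k = k :: upIdx u r (k + 1) by simp [upIdx, hu]]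
            have hall : ∀ i ∈ k :: upIdx u r (k + 1), k ≤ i := by
              intro i hi
              rcases List.mem_cons.mp hi with h | h
              · omega
              · exact hup' i h
            rw [pvPair_cons_eq_pvOpen hall]
            have h1 : runA d u (some a :: r) k false s =
                [("start_frame", k), ("end_frame", k)] :: runA d u r (k + 1) false k := by
              simp [runA, hd, hu]
            rw [h1, ihF k]
            simp [pvOpen, dropWhile_le_id hdn]
          · -- rep opens at k and stays open
            rw [show upIdx u (some a :: r) k = upIdx u r (k + 1) by simp [upIdx, hu]]
            have h1 : runA d u (some a :: r) k false s = runA d u r (k + 1) true k := by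
              simp [runA, hd, hu]
            rw [h1, ihT k, pvPair_cons_eq_pvOpen hup']
        · rw [show dnIdx d (some a :: r) k = dnIdx d r (k + 1) by simp [dnIdx, hd]]
          have h1 : runA d u (some a :: r) k false s = runA d u r (k + 1) false s := by
            simp [runA, hd]
          rw [h1, ihF s]
          by_cases hu : a > u
          · rw [show upIdx u (some a :: r) k = k :: upIdx u r (k + 1) by simp [upIdx, hu]]
            rw [pvPair_skip_up _ hdn]
          · rw [show upIdx u (some a :: r) k = upIdx u r (k + 1) by simp [upIdx, hu]]
      · intro s
        by_cases hu : a > u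
        · -- the open rep closes at k
          have h1 : runA d u (some a :: r) k true s =
              [("start_frame", s), ("end_frame", k)] :: runA d u r (k + 1) false s := by
            simp [runA, hu]
          rw [h1, ihF s,
              show upIdx u (some a :: r) k = k :: upIdx u r (k + 1) by simp [upIdx, hu]]
          by_cases hd : a < d
          · rw [show dnIdx d (some a :: r) k = k :: dnIdx d r (k + 1) by simp [dnIdx, hd]]
            simp [pvOpen, dropWhile_le_id hdn]
          · rw [show dnIdx d (some a :: r) k = dnIdx d r (k + 1) by simp [dnIdx, hd]]
            simp [pvOpen, dropWhile_le_id hdn]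
        · have h1 : runA d u (some a :: r) k true s = runA d u r (k + 1) true s := by
            simp [runA, hu]
          rw [h1, ihT s,
              show upIdx u (some a :: r) k = upIdx u r (k + 1) by simp [upIdx, hu]]
          by_cases hd : a < d
          · rw [show dnIdx d (some a :: r) k = k :: dnIdx d r (k + 1) by simp [dnIdx, hd]]
            rw [pvOpen_skip_down _ _ hup]
          · rw [show dnIdx d (some a :: r) k = dnIdx d r (k + 1) by simp [dnIdx, hd]]

-- A's foldl equals the recursive model
theorem foldA_eq (d u : Int) : ∀ (t : List (Option Int)) (k : Int)
    (acc : List (List (String × Int))) (b : Bool) (s : Int),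
    ((PySem.List.enumerate t k).foldl (stepA d u) (acc, b, s)).1 = acc ++ runA d u t k b s := by
  intro t
  induction t with
  | nil => intro k acc b s; simp [PySem.List.enumerate_nil, runA]
  | cons x r ih =>
    intro k acc b s
    rw [PySem.List.enumerate_cons, List.foldl_cons]
    cases x with
    | none => simp [stepA, runA, ih]
    | some a =>
      cases b with
      | true =>
        by_cases hu : a > u
        · have hst : stepA d u (acc, true, s) (k, some a) =
              (acc ++ [[("start_frame", s), ("end_frame", k)]], false, s) := by
            simp [stepA, hu]
          rw [hst, ih]
          simp [runA, hu]
        · have hst : stepA d u (acc, true, s) (k, some a) = (acc, true, s) := by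
            simp [stepA, hu]
          rw [hst, ih]
          simp [runA, hu]
      | false =>
        by_cases hd : a < d
        · by_cases hu : a > u
          · have hst : stepA d u (acc, false, s) (k, some a) =
                (acc ++ [[("start_frame", k), ("end_frame", k)]], false, k) := by
              simp [stepA, hd, hu]
            rw [hst, ih]
            simp [runA, hd, hu]
          · have hst : stepA d u (acc, false, s) (k, some a) = (acc, true, k) := by
              simp [stepA, hd, hu]
            rw [hst, ih]
            simp [runA, hd, hu]
        · have hst : stepA d u (acc, false, s) (k, some a) = (acc, false, s) := by
            simp [stepA, hd]
          rw [hst, ih]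
          simp [runA, hd]

-- B's comprehensions equal the recursive index lists
theorem pvDowns_eq (d : Int) : ∀ (t : List (Option Int)) (k : Int),
    ((PySem.List.enumerate t k).filter
      (fun p => match p.2 with | some a => decide (a < d) | none => false)).map (fun p => p.1)
    = dnIdx d t k := by
  intro t
  induction t with
  | nil => intro k; simp [PySem.List.enumerate_nil, dnIdx]
  | cons x r ih =>
    intro k
    rw [PySem.List.enumerate_cons]
    cases x with
    | none => simp [dnIdx, ih]
    | some a => by_cases hd : a < d <;> simp [dnIdx, hd, ih]

theorem pvUps_eq (u : Int) : ∀ (t : List (Option Int)) (k : Int),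
    ((PySem.List.enumerate t k).filter
      (fun p => match p.2 with | some a => decide (a > u) | none => false)).map (fun p => p.1)
    = upIdx u t k := by
  intro t
  induction t with
  | nil => intro k; simp [PySem.List.enumerate_nil, upIdx]
  | cons x r ih =>
    intro k
    rw [PySem.List.enumerate_cons]
    cases x with
    | none => simp [upIdx, ih]
    | some a => by_cases hu : a > u <;> simp [upIdx, hu, ih]

-- ===== VERDICT (by name: the statement is the Claim_ definition above) =====
theorem detect_pushup_reps_spec : Claim_equal_detect_pushup_reps := by
  intro series d u _
  unfold Spec_detect_pushup_reps detect_pushup_reps detect_pushup_reps_alt pvDowns pvUps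
  rw [foldA_eq, pvDowns_eq, pvUps_eq, (runA_eq d u series 0).1 0]
  simp
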